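-- pv_equiv track=rewrite | github.com/filipecattoni/omr-tcc | segmentation.py | segment_staves
-- ===== SOURCE A (Python) =====
-- def segment_staves(img, grouped_staff_rows):
--
-- 	# deve retornar uma lista de pares com os valores de inicio e fim de cada pentagrama
--
-- 	staves_n = int(len(grouped_staff_rows)/5)
--
-- 	bounds = []
--
-- 	upper = 0
-- 	lower = int((grouped_staff_rows[5][0] + grouped_staff_rows[4][-1])/2)
-- 	bounds.append([upper, lower])
--
-- 	for i in range(1, staves_n-1):
-- 		upper = lower
-- 		lower = int((grouped_staff_rows[i*5+5][0] + grouped_staff_rows[i*5+4][-1])/2)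
-- 		bounds.append([upper, lower])
--
-- 	upper = lower
-- 	lower = len(img)
-- 	bounds.append([upper, lower])
--
-- 	return bounds
-- ===== SOURCE B (Python) =====
-- def segment_staves(img, grouped_staff_rows):
--     # recursive decomposition: each call emits one system [upper, lower] and
--     # recurses with the new upper bound; the last system ends at len(img)
--     staves_n = int(len(grouped_staff_rows) / 5)
--
--     def mid(i):
--         return int((grouped_staff_rows[i * 5 + 5][0] + grouped_staff_rows[i * 5 + 4][-1]) / 2)
--
--     def rest(i, upper):
--         if i > staves_n - 2:
--             return [[upper, len(img)]]
--         m = mid(i)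
--         return [[upper, m]] + rest(i + 1, m)
--
--     first = mid(0)
--     return [[0, first]] + rest(1, first)
-- ===== Notes on version B (the rewrite author's own statement) =====
-- stated objective: alternative
-- what changed: Replaces A's iterative loop with a running upper/lower accumulator and appended bounds list by a recursive decomposition: each recursive call emits one [upper, lower] pair and recurses with the new upper bound, the base case emitting the final [upper, len(img)] segment.
import Mathlib
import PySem

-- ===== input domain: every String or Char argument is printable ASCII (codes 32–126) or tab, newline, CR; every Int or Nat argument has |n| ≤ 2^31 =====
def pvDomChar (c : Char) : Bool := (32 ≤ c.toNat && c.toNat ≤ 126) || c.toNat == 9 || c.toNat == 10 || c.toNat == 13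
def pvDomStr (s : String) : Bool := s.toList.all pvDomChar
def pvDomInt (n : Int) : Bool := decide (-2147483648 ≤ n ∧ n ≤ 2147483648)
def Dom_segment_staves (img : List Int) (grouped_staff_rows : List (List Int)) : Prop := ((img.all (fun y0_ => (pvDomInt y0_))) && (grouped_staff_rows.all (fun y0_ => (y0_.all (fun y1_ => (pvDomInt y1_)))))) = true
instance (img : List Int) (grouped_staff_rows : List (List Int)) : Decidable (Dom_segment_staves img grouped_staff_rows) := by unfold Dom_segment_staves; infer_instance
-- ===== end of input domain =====

-- B replaces A's loop with a running upper/lower accumulator by a recursive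
-- decomposition (each call emits one segment and recurses with the new upper bound).

-- ===== PORT A =====
-- int((rows[i*5+5][0] + rows[i*5+4][-1])/2): PySem.Int.truncdiv is exact here (|entries| ≤ 2^31 on Dom).
-- Out-of-range indexing (an IndexError in Python) is excluded by Pre_; the port uses getD 0 there.
def pvMidA (rows : List (List Int)) (i : Nat) : Int :=
  let a := (PySem.List.pyGet? ((PySem.List.pyGet? rows ((i : Int) * 5 + 5)).getD []) 0).getD 0
  let b := (PySem.List.pyGet? ((PySem.List.pyGet? rows ((i : Int) * 5 + 4)).getD []) (-1)).getD 0
  PySem.Int.truncdiv (a + b) 2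

def segment_staves (img : List Int) (grouped_staff_rows : List (List Int)) : List (List Int) :=
  let staves_n : Nat := grouped_staff_rows.length / 5
  let lower : Int := pvMidA grouped_staff_rows 0
  let bounds : List (List Int) := [[0, lower]]
  -- for i in range(1, staves_n-1): state = (lower, bounds)
  let res := (List.range' 1 (staves_n - 2)).foldl
    (fun (st : Int × List (List Int)) i =>
      let upper := st.1
      let lower := pvMidA grouped_staff_rows i
      (lower, st.2 ++ [[upper, lower]]))
    (lower, bounds)
  res.2 ++ [[res.1, (img.length : Int)]]

-- ===== PORT B =====
def pvMidB (rows : List (List Int)) (i : Nat) : Int :=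
  let a := (PySem.List.pyGet? ((PySem.List.pyGet? rows ((i : Int) * 5 + 5)).getD []) 0).getD 0
  let b := (PySem.List.pyGet? ((PySem.List.pyGet? rows ((i : Int) * 5 + 4)).getD []) (-1)).getD 0
  PySem.Int.truncdiv (a + b) 2

-- rest(i, upper): the comparison i > staves_n - 2 is Python int arithmetic, hence over Int.
def pvRestB (rows : List (List Int)) (imgLen : Int) (n : Nat) (i : Nat) (upper : Int) : List (List Int) :=
  if (n : Int) - 2 < (i : Int) then [[upper, imgLen]]
  else
    let m := pvMidB rows i
    [[upper, m]] ++ pvRestB rows imgLen n (i + 1) m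
termination_by n - i
decreasing_by omega

def segment_staves_alt (img : List Int) (grouped_staff_rows : List (List Int)) : List (List Int) :=
  let staves_n : Nat := grouped_staff_rows.length / 5
  let first := pvMidB grouped_staff_rows 0
  [[0, first]] ++ pvRestB grouped_staff_rows (img.length : Int) staves_n 1 first

-- ===== PRECONDITION & SPEC =====
-- Pre_ excludes exactly the inputs on which A raises IndexError: fewer than 6 row groups
-- (rows[5] does not exist) or an empty row group at one of the indexed positions 5i+4 / 5i+5.
def Pre_segment_staves (img : List Int) (grouped_staff_rows : List (List Int)) : Prop :=
  6 ≤ grouped_staff_rows.length ∧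
  grouped_staff_rows.getD 4 [] ≠ [] ∧ grouped_staff_rows.getD 5 [] ≠ [] ∧
  ∀ i ∈ List.range' 1 (grouped_staff_rows.length / 5 - 2),
    grouped_staff_rows.getD (i * 5 + 4) [] ≠ [] ∧ grouped_staff_rows.getD (i * 5 + 5) [] ≠ []
instance (img : List Int) (grouped_staff_rows : List (List Int)) : Decidable (Pre_segment_staves img grouped_staff_rows) := by unfold Pre_segment_staves; infer_instance

def pvWitness_segment_staves : List Int × List (List Int) :=
  ([7], [[], [], [], [], [10], [20]])

def Spec_segment_staves (img : List Int) (grouped_staff_rows : List (List Int)) (out : List (List Int)) : Prop := out = segment_staves_alt img grouped_staff_rows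
instance (img : List Int) (grouped_staff_rows : List (List Int)) (out : List (List Int)) : Decidable (Spec_segment_staves img grouped_staff_rows out) := by unfold Spec_segment_staves; infer_instance

-- ===== CLAIM (what is proved, stated in full; the proofs are below) =====
def Claim_equal_segment_staves : Prop := ∀ (img : List Int) (grouped_staff_rows : List (List Int)), Dom_segment_staves img grouped_staff_rows → Pre_segment_staves img grouped_staff_rows → Spec_segment_staves img grouped_staff_rows (segment_staves img grouped_staff_rows)

-- ===== LEMMAS AND PROOFS =====

def pvPairsOf (l : List Int) : List (List Int) :=
  (l.zip l.tail).map (fun p => [p.1, p.2])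

theorem pvMidB_eq_pvMidA : pvMidB = pvMidA := rfl

theorem pvPairsOf_concat (l : List Int) (x : Int) (h : l ≠ []) :
    pvPairsOf (l ++ [x]) = pvPairsOf l ++ [[l.getLastD 0, x]] := by
  induction l with
  | nil => exact absurd rfl h
  | cons a t ih =>
    cases t with
    | nil => simp [pvPairsOf]
    | cons b t' =>
      have := ih (by simp)
      simp only [pvPairsOf, List.cons_append] at this ⊢
      simp_all [List.getLastD]

theorem pvFold (rows : List (List Int)) (k s : Nat) (L : List Int) (hL : L ≠ []) :
    (List.range' s k).foldl
      (fun (st : Int × List (List Int)) i =>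
        (pvMidA rows i, st.2 ++ [[st.1, pvMidA rows i]]))
      (L.getLastD 0, pvPairsOf L)
    = ((L ++ (List.range' s k).map (pvMidA rows)).getLastD 0,
       pvPairsOf (L ++ (List.range' s k).map (pvMidA rows))) := by
  induction k generalizing s L with
  | zero => simp
  | succ k ih =>
    rw [List.range'_succ]
    simp only [List.foldl_cons, List.map_cons]
    have hstep : (pvMidA rows s, pvPairsOf L ++ [[L.getLastD 0, pvMidA rows s]])
        = ((L ++ [pvMidA rows s]).getLastD 0, pvPairsOf (L ++ [pvMidA rows s])) := by
      rw [pvPairsOf_concat L _ hL]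
      simp
    rw [hstep, ih (s + 1) (L ++ [pvMidA rows s]) (by simp)]
    simp

-- B's recursion computes the consecutive pairs of upper :: midpoints ++ [imgLen].
theorem pvRestB_eq_pairs (rows : List (List Int)) (imgLen : Int) (n i : Nat) (upper : Int) :
    pvRestB rows imgLen n i upper
    = pvPairsOf (upper :: (List.range' i (n - 1 - i)).map (pvMidA rows) ++ [imgLen]) := by
  fun_induction pvRestB rows imgLen n i upper with
  | case1 i upper h =>
    have : n - 1 - i = 0 := by omega
    simp [this, pvPairsOf]
  | case2 i upper h m ih =>
    have hk : n - 1 - i = (n - 1 - (i + 1)) + 1 := by omega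
    rw [hk, List.range'_succ, ih]
    simp [pvPairsOf]
    exact ⟨rfl, rfl⟩

theorem segment_staves_eq_alt (img : List Int) (rows : List (List Int)) :
    segment_staves img rows = segment_staves_alt img rows := by
  simp only [segment_staves, segment_staves_alt]
  rw [pvMidB_eq_pvMidA, pvRestB_eq_pairs]
  have h0 : (pvMidA rows 0, ([[0, pvMidA rows 0]] : List (List Int)))
      = (([0, pvMidA rows 0] : List Int).getLastD 0, pvPairsOf [0, pvMidA rows 0]) := by
    simp [pvPairsOf]
  rw [h0, pvFold rows (rows.length / 5 - 2) 1 [0, pvMidA rows 0] (by simp)]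
  dsimp only
  rw [← pvPairsOf_concat ([0, pvMidA rows 0] ++ (List.range' 1 (rows.length / 5 - 2)).map (pvMidA rows)) ((img.length : Int)) (by simp)]
  have hk : rows.length / 5 - 1 - 1 = rows.length / 5 - 2 := by omega
  simp [pvPairsOf, hk]

-- ===== VERDICT (by name: the statement is the Claim_ definition above) =====
theorem segment_staves_spec : Claim_equal_segment_staves := by
  intro img rows _ _
  exact segment_staves_eq_alt img rows
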